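-- pv_equiv track=rewrite | github.com/chriswengqi/kattis | 4thought/4thought.py | calculate
-- ===== SOURCE A (Python) =====
-- def calculate(arr):
--     stack = [4]
--
--     for op in arr:
--         if op == "/":
--             prev = stack.pop()
--             if prev >= 0:
--                 stack.append(prev // 4)
--             else:
--                 stack.append(-1 * (-prev // 4))
--         elif op == "*":
--             prev = stack.pop()
--             stack.append(prev * 4)
--         elif op == "+":
--             stack.append(4)
--         else:
--             stack.append(-4)
--     return sum(stack)
-- ===== SOURCE B (Python) =====
-- def calculate(arr):
--     # Two running integers instead of a stack: total = sum of completed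
--     # terms, current = the term in progress (starts at 4).
--     total = 0
--     current = 4
--     for op in arr:
--         if op == "/":
--             current = current // 4 if current >= 0 else -(-current // 4)
--         elif op == "*":
--             current = current * 4
--         elif op == "+":
--             total += current
--             current = 4
--         else:
--             total += current
--             current = -4
--     return total + current
-- ===== Notes on version B (the rewrite author's own statement) =====
-- stated objective: simpler
-- what changed: Replaces the stack list and the final sum() pass with two running integers (total of completed terms, current term), so no list is built or summed.
import Mathlib
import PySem

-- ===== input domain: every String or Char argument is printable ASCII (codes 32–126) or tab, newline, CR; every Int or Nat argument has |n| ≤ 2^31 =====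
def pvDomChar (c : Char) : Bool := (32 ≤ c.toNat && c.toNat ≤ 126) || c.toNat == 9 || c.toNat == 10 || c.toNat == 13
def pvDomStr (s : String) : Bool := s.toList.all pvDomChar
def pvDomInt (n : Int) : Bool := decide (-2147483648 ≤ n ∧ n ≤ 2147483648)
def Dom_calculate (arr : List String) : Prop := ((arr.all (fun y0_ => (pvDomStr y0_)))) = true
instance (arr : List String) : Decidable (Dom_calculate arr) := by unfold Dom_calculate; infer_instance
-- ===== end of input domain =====

-- B replaces A's stack list + final sum with two running integers (total, current); equivalence proved for all inputs.


-- ===== PORT A =====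
-- one loop step on the stack (top = last element; stack.pop / stack.append on the list end);
-- the stack is provably never empty, so 'pop' is getLast?/dropLast with an unreachable default
def calcStepA (stack : List Int) (op : String) : List Int :=
  if op == "/" then
    let prev := stack.getLast?.getD 0
    if prev ≥ 0 then stack.dropLast ++ [PySem.Int.floordiv prev 4]
    else stack.dropLast ++ [-1 * PySem.Int.floordiv (-prev) 4]
  else if op == "*" then
    let prev := stack.getLast?.getD 0
    stack.dropLast ++ [prev * 4]
  else if op == "+" then stack ++ [4]
  else stack ++ [-4]

def calculate (arr : List String) : Int :=
  (arr.foldl calcStepA [4]).sum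

-- ===== PORT B =====
-- state = (total, current)
def calcStepB (st : Int × Int) (op : String) : Int × Int :=
  if op == "/" then
    (st.1, if st.2 ≥ 0 then PySem.Int.floordiv st.2 4 else -(PySem.Int.floordiv (-st.2) 4))
  else if op == "*" then (st.1, st.2 * 4)
  else if op == "+" then (st.1 + st.2, 4)
  else (st.1 + st.2, -4)

def calculate_alt (arr : List String) : Int :=
  let st := arr.foldl calcStepB (0, 4)
  st.1 + st.2

-- ===== PRECONDITION & SPEC =====
def Spec_calculate (arr : List String) (out : Int) : Prop := out = calculate_alt arr
instance (arr : List String) (out : Int) : Decidable (Spec_calculate arr out) := by unfold Spec_calculate; infer_instance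

-- ===== CLAIM (what is proved, stated in full; the proofs are below) =====
def Claim_equal_calculate : Prop := ∀ (arr : List String), Dom_calculate arr → Spec_calculate arr (calculate arr)

-- ===== LEMMAS AND PROOFS =====
-- Invariant: A's stack is (completed terms, with sum = total) ++ [current term].
theorem calc_inv (arr : List String) : ∀ (s : List Int) (t c : Int), s.sum = t →
    (arr.foldl calcStepA (s ++ [c])).sum =
      (arr.foldl calcStepB (t, c)).1 + (arr.foldl calcStepB (t, c)).2 := by
  induction arr with
  | nil => intro s t c h; simp [h]
  | cons op rest ih =>
    intro s t c h
    simp only [List.foldl_cons, calcStepA, calcStepB]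
    by_cases h1 : op == "/"
    · simp only [h1, if_true]
      by_cases h2 : c ≥ 0 <;>
        simp [h2, List.getLast?_append, ih s t _ h]
    · by_cases h2 : op == "*"
      · simp [h1, h2, List.getLast?_append, ih s t _ h]
      · by_cases h3 : op == "+"
        · have := ih (s ++ [c]) (t + c) 4 (by simp [h])
          simpa [h1, h2, h3, List.append_assoc] using this
        · have := ih (s ++ [c]) (t + c) (-4) (by simp [h])
          simpa [h1, h2, h3, List.append_assoc] using this

-- ===== VERDICT (by name: the statement is the Claim_ definition above) =====
theorem calculate_spec : Claim_equal_calculate := by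
  intro arr _
  unfold Spec_calculate calculate calculate_alt
  simpa using calc_inv arr [] 0 4 rfl
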